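-- pv_equiv track=rewrite | github.com/yaneurao/Pytra | test/py/case97_loop.py | calc_97
-- ===== SOURCE A (Python) =====
-- def calc_97(values: list[int]) -> int:
--     total: int = 0
--     for v in values:
--         if v % 2 == 0:
--             total = total + v
--         else:
--             total = total + (v * 2)
--     return total
-- ===== SOURCE B (Python) =====
-- def calc_97(values: list[int]) -> int:
--     return sum(values) + sum(v for v in values if v % 2)
-- ===== Notes on version B (the rewrite author's own statement) =====
-- stated objective: simpler
-- what changed: Replaces the single per-element branching accumulator with two plain reductions: the total of all elements plus a filtered sum of the odd elements (one extra copy of each odd value).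
import Mathlib
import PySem

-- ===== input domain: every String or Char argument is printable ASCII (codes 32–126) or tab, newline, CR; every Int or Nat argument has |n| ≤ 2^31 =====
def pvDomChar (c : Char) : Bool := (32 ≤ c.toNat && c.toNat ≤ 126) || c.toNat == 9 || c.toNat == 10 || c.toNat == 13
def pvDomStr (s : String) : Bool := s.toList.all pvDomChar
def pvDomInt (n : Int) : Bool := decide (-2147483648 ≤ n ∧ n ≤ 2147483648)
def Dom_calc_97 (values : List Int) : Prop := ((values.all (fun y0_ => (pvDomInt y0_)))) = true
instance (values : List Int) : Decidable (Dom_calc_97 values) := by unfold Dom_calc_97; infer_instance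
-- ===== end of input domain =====

-- ===== PORT A =====
-- B changes decomposition only: two plain sums (total + filtered odd sum) instead of one branching loop.
def calc_97 (values : List Int) : Int :=
  values.foldl (fun total v => if PySem.Int.mod v 2 = 0 then total + v else total + v * 2) 0

-- ===== PORT B =====
def calc_97_alt (values : List Int) : Int :=
  values.sum + (values.filter (fun v => PySem.Int.mod v 2 ≠ 0)).sum

-- ===== PRECONDITION & SPEC =====
def Spec_calc_97 (values : List Int) (out : Int) : Prop := out = calc_97_alt values
instance (values : List Int) (out : Int) : Decidable (Spec_calc_97 values out) := by unfold Spec_calc_97; infer_instance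

-- ===== CLAIM (what is proved, stated in full; the proofs are below) =====
def Claim_equal_calc_97 : Prop := ∀ (values : List Int), Dom_calc_97 values → Spec_calc_97 values (calc_97 values)

-- ===== LEMMAS AND PROOFS =====

-- ===== VERDICT (by name: the statement is the Claim_ definition above) =====
theorem calc_97_foldl (values : List Int) (acc : Int) :
    values.foldl (fun total v => if PySem.Int.mod v 2 = 0 then total + v else total + v * 2) acc
      = acc + values.sum + (values.filter (fun v => PySem.Int.mod v 2 ≠ 0)).sum := by
  induction values generalizing acc with
  | nil => simp
  | cons x xs ih =>
    simp only [List.foldl_cons, List.filter_cons, ih]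
    by_cases h : PySem.Int.mod x 2 = 0 <;>
      simp only [h, decide_not, decide_true, decide_false, Bool.not_true, Bool.not_false,
        Bool.false_eq_true, ite_true, ite_false, List.sum_cons] <;> ring

theorem calc_97_spec : Claim_equal_calc_97 := by
  intro values _
  unfold Spec_calc_97 calc_97 calc_97_alt
  rw [calc_97_foldl]
  ring
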